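-- pv_equiv track=rewrite | github.com/albertventura/advent-of-code | 2023/day11.py | find_all_galaxies
-- ===== SOURCE A (Python) =====
-- def find_all_galaxies(s, row, empty_cols, dilation_factor):
--     positions = []
--     index = s.find("#")
--     while index != -1:
--         expansion_factor = len(list(filter(lambda x: x < index, empty_cols)))
--         # This was hard.. For each column that I duplicate I need to substract that same column
--         expansion_factor = expansion_factor * dilation_factor - expansion_factor
--         positions.append((row, index + expansion_factor))
--         index = s.find("#", index + 1)
--     return positions
-- ===== SOURCE B (Python) =====
-- def find_all_galaxies(s, row, empty_cols, dilation_factor):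
--     # one forward pass: running count of empty columns passed so far
--     counts = {}
--     seen = 0
--     for c in empty_cols:
--         if c < 0:
--             seen += 1
--         else:
--             counts[c] = counts.get(c, 0) + 1
--     positions = []
--     for i, ch in enumerate(s):
--         if ch == '#':
--             positions.append((row, i + seen * (dilation_factor - 1)))
--         seen += counts.get(i, 0)
--     return positions
-- ===== Notes on version B (the rewrite author's own statement) =====
-- stated objective: alternative
-- what changed: Replaces the find-next-'#' loop that rescans all of empty_cols for every galaxy by a single enumerate pass over s carrying a running count of empty columns already passed (multiplicities pre-counted into a dict, negatives folded into the initial count).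
import Mathlib
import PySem

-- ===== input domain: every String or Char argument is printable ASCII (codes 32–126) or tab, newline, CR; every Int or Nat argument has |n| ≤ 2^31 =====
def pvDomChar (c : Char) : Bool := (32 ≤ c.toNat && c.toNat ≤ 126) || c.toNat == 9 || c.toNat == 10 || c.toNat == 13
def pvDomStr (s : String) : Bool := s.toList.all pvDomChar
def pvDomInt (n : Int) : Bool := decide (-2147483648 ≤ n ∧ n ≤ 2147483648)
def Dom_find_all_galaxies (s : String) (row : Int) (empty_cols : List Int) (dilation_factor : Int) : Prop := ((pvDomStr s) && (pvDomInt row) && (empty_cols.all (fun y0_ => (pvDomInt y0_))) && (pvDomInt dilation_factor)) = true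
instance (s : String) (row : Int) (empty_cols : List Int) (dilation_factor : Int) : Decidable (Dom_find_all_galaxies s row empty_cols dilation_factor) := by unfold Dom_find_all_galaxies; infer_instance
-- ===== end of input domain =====

-- B replaces A's per-galaxy rescans of empty_cols by a single counting pass plus one
-- forward enumerate pass over s carrying a running count of empty columns already passed.

-- ===== PORT A =====
-- fuel (s.length + 1) only makes the while-loop total; it never runs out, since each
-- s.find("#", index+1) strictly increases index, which stays below s.length
def pvGalLoopA (s : String) (row : Int) (empty_cols : List Int) (dilation_factor : Int) : Nat → Int → List (Int × Int)
  | 0, _ => []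
  | fuel + 1, index =>
    if index = -1 then []
    else
      let e0 : Int := ((empty_cols.filter (fun x => decide (x < index))).length : Int)
      let ef : Int := e0 * dilation_factor - e0
      (row, index + ef) :: pvGalLoopA s row empty_cols dilation_factor fuel (PySem.Str.findFrom s "#" (index + 1) none)

def find_all_galaxies (s : String) (row : Int) (empty_cols : List Int) (dilation_factor : Int) : List (Int × Int) :=
  pvGalLoopA s row empty_cols dilation_factor (s.toList.length + 1) (PySem.Str.find s "#")

-- ===== PORT B =====
def find_all_galaxies_alt (s : String) (row : Int) (empty_cols : List Int) (dilation_factor : Int) : List (Int × Int) :=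
  let init : PySem.Dict Int Int × Int :=
    empty_cols.foldl
      (fun p c =>
        if c < 0 then (p.1, p.2 + 1)
        else (p.1.insert c (p.1.getD c 0 + 1), p.2))
      (PySem.Dict.empty, 0)
  let counts := init.1
  ((PySem.List.enumerate s.toList 0).foldl
    (fun (p : List (Int × Int) × Int) ic =>
      let pos := if ic.2 = '#' then p.1 ++ [(row, ic.1 + p.2 * (dilation_factor - 1))] else p.1
      (pos, p.2 + counts.getD ic.1 0))
    ([], init.2)).1

-- ===== PRECONDITION & SPEC =====
def Spec_find_all_galaxies (s : String) (row : Int) (empty_cols : List Int) (dilation_factor : Int) (out : List (Int × Int)) : Prop := out = find_all_galaxies_alt s row empty_cols dilation_factor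
instance (s : String) (row : Int) (empty_cols : List Int) (dilation_factor : Int) (out : List (Int × Int)) : Decidable (Spec_find_all_galaxies s row empty_cols dilation_factor out) := by unfold Spec_find_all_galaxies; infer_instance

-- ===== CLAIM (what is proved, stated in full; the proofs are below) =====
def Claim_equal_find_all_galaxies : Prop := ∀ (s : String) (row : Int) (empty_cols : List Int) (dilation_factor : Int), Dom_find_all_galaxies s row empty_cols dilation_factor → Spec_find_all_galaxies s row empty_cols dilation_factor (find_all_galaxies s row empty_cols dilation_factor)

-- ===== LEMMAS AND PROOFS =====

-- reference: for each '#' at column i emit (row, i + cnt(i)*d - cnt(i)), cnt(i) = #{x ∈ empty_cols | x < i}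
def gspec (row : Int) (ec : List Int) (d : Int) : List Char → Nat → List (Int × Int)
  | [], _ => []
  | c :: rest, i =>
    (if c = '#' then
       [(row, (i : Int) + (((ec.filter (fun x => decide (x < (i : Int)))).length : Int) * d
                 - ((ec.filter (fun x => decide (x < (i : Int)))).length : Int)))]
     else []) ++ gspec row ec d rest (i + 1)

lemma gspec_of_not_mem (row : Int) (ec : List Int) (d : Int) :
    ∀ (l : List Char) (i : Nat), '#' ∉ l → gspec row ec d l i = [] := by
  intro l
  induction l with
  | nil => intro i _; rfl
  | cons c rest ih =>
    intro i h
    simp only [List.mem_cons, not_or] at h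
    simp [gspec, Ne.symm h.1, ih _ h.2]

lemma singleton_infix_of_mem {α : Type} (a : α) (l : List α) (h : a ∈ l) : [a] <:+: l := by
  obtain ⟨s, t, rfl⟩ := List.append_of_mem h
  exact ⟨s, t, by simp⟩

-- splitting gspec at the first '#' at or after k
lemma gspec_split (row : Int) (ec : List Int) (d : Int) (chars : List Char) :
    ∀ (k j : Nat), k ≤ j → (hj : j < chars.length) → chars[j] = '#' →
    (∀ i, k ≤ i → i < j → ¬ ['#'] <+: chars.drop i) →
    gspec row ec d (chars.drop k) k =
      (row, (j : Int) + (((ec.filter (fun x => decide (x < (j : Int)))).length : Int) * d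
          - ((ec.filter (fun x => decide (x < (j : Int)))).length : Int)))
        :: gspec row ec d (chars.drop (j + 1)) (j + 1) := by
  intro k j hkj hj hsharp hnone
  induction hn : j - k generalizing k with
  | zero =>
    have hk : k = j := by omega
    subst hk
    rw [List.drop_eq_getElem_cons hj]
    simp [gspec, hsharp]
  | succ n ihn =>
    have hkl : k < chars.length := by omega
    rw [List.drop_eq_getElem_cons hkl]
    have hne : chars[k] ≠ '#' := by
      intro h
      apply hnone k le_rfl (by omega)
      rw [List.drop_eq_getElem_cons hkl, h]
      exact ⟨chars.drop (k + 1), rfl⟩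
    simp only [gspec, if_neg hne, List.nil_append]
    exact ihn (k + 1) (by omega) (fun i h1 h2 => hnone i (by omega) h2) (by omega)

lemma aloop_eq (s : String) (row : Int) (ec : List Int) (d : Int) :
    ∀ (fuel k : Nat), k ≤ s.toList.length → s.toList.length - k + 1 ≤ fuel →
      pvGalLoopA s row ec d fuel (PySem.Chars.findFrom s.toList ['#'] (k : Int) none)
        = gspec row ec d (s.toList.drop k) k := by
  intro fuel
  induction fuel with
  | zero => intro k hk hfuel; omega
  | succ fuel ih =>
    intro k hk hfuel
    by_cases h : PySem.Chars.findFrom s.toList ['#'] (k : Int) none = -1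
    · rw [pvGalLoopA, if_pos h]
      refine (gspec_of_not_mem row ec d _ k ?_).symm
      intro hmem
      exact ((PySem.Chars.findFrom_natCast_eq_neg_one_iff s.toList ['#'] k hk).mp h)
        (singleton_infix_of_mem _ _ hmem)
    · obtain ⟨h1, h2, h3⟩ := PySem.Chars.findFrom_natCast_spec s.toList ['#'] k hk h
      set F := PySem.Chars.findFrom s.toList ['#'] (k : Int) none with hF
      have hF0 : 0 ≤ F := le_trans (Int.natCast_nonneg k) h1
      set j := F.toNat with hj
      have hFj : F = (j : Int) := (Int.toNat_of_nonneg hF0).symm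
      obtain ⟨t, ht⟩ := h2
      have hjlen : j < s.toList.length := by
        by_contra hge
        rw [List.drop_eq_nil_of_le (by omega)] at ht
        simp at ht
      have hjget : s.toList[j] = '#' := by
        rw [List.drop_eq_getElem_cons hjlen] at ht
        have ht' : '#' :: t = s.toList[j] :: s.toList.drop (j + 1) := by simpa using ht
        exact ((List.cons_eq_cons.mp ht').1).symm
      have hkj : k ≤ j := by
        have h1' : (k : Int) ≤ (j : Int) := hFj ▸ h1
        exact_mod_cast h1'
      rw [pvGalLoopA, if_neg h]
      have hrec : PySem.Str.findFrom s "#" (F + 1) none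
          = PySem.Chars.findFrom s.toList ['#'] ((j + 1 : Nat) : Int) none := by
        rw [PySem.Str.findFrom_eq]
        have : ("#".toList) = ['#'] := rfl
        rw [this, hFj]
        norm_num
      rw [hrec, ih (j + 1) (by omega) (by omega)]
      rw [gspec_split row ec d s.toList k j hkj hjlen hjget
        (fun i hi1 hi2 => h3 i hi1 (by omega))]
      simp only [hFj]

-- first fold of B: the dict counts each nonnegative value's multiplicity, the Int counts negatives
lemma initFold_getD (ec : List Int) (k : Nat) :
    ∀ (dct : PySem.Dict Int Int) (b : Int),
      ((ec.foldl
        (fun p c =>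
          if c < 0 then (p.1, p.2 + 1)
          else (p.1.insert c (p.1.getD c 0 + 1), p.2))
        (dct, b)).1).getD (k : Int) 0
      = dct.getD (k : Int) 0 + ((ec.filter (fun x => decide (x = (k : Int)))).length : Int) := by
  induction ec with
  | nil => intro dct b; simp
  | cons c rest ih =>
    intro dct b
    simp only [List.foldl_cons, List.filter_cons]
    by_cases hc : c < 0
    · have hne : (decide (c = (k : Int))) = false := by
        simp only [decide_eq_false_iff_not]; omega
      simp only [if_pos hc, hne, Bool.false_eq_true, if_neg, not_false_iff]
      exact ih dct (b + 1)
    · simp only [if_neg hc]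
      rw [ih]
      rw [PySem.Dict.getD_insert]
      by_cases hk : (k : Int) = c
      · subst hk
        rw [if_pos rfl]
        have hd : (decide ((k : Int) = (k : Int))) = true := by simp
        rw [hd]
        simp only [if_true, List.length_cons]
        push_cast
        omega
      · have hd : (decide (c = (k : Int))) = false := by
          simp only [decide_eq_false_iff_not]; exact fun h => hk h.symm
        rw [if_neg hk, hd]
        simp

lemma initFold_snd (ec : List Int) :
    ∀ (dct : PySem.Dict Int Int) (b : Int),
      (ec.foldl
        (fun p c =>
          if c < 0 then (p.1, p.2 + 1)
          else (p.1.insert c (p.1.getD c 0 + 1), p.2))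
        (dct, b)).2
      = b + ((ec.filter (fun x => decide (x < (0 : Int)))).length : Int) := by
  induction ec with
  | nil => intro dct b; simp
  | cons c rest ih =>
    intro dct b
    simp only [List.foldl_cons, List.filter_cons]
    by_cases hc : c < 0
    · have hd : (decide (c < (0 : Int))) = true := by simpa using hc
      simp only [if_pos hc, hd, if_true, List.length_cons, ih]
      push_cast
      omega
    · have hd : (decide (c < (0 : Int))) = false := by simpa using hc
      simp only [if_neg hc, hd, Bool.false_eq_true, if_neg, not_false_iff, ih]

lemma cnt_succ (ec : List Int) (k : Int) :
    ((ec.filter (fun x => decide (x < k + 1))).length : Int)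
      = ((ec.filter (fun x => decide (x < k))).length : Int)
        + ((ec.filter (fun x => decide (x = k))).length : Int) := by
  induction ec with
  | nil => simp
  | cons c rest ih =>
    simp only [List.filter_cons]
    rcases lt_trichotomy c k with h | h | h
    · have h1 : (decide (c < k + 1)) = true := by simp only [decide_eq_true_eq]; omega
      have h2 : (decide (c < k)) = true := by simp only [decide_eq_true_eq]; omega
      have h3 : (decide (c = k)) = false := by simp only [decide_eq_false_iff_not]; omega
      simp only [h1, h2, h3, if_true, Bool.false_eq_true, if_neg, not_false_iff,
        List.length_cons]
      push_cast
      omega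
    · have h1 : (decide (c < k + 1)) = true := by simp only [decide_eq_true_eq]; omega
      have h2 : (decide (c < k)) = false := by simp only [decide_eq_false_iff_not]; omega
      have h3 : (decide (c = k)) = true := by simp only [decide_eq_true_eq]; omega
      simp only [h1, h2, h3, if_true, Bool.false_eq_true, if_neg, not_false_iff,
        List.length_cons]
      push_cast
      omega
    · have h1 : (decide (c < k + 1)) = false := by simp only [decide_eq_false_iff_not]; omega
      have h2 : (decide (c < k)) = false := by simp only [decide_eq_false_iff_not]; omega
      have h3 : (decide (c = k)) = false := by simp only [decide_eq_false_iff_not]; omega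
      simp only [h1, h2, h3, Bool.false_eq_true, if_neg, not_false_iff]
      exact ih

lemma bfold_eq (row : Int) (ec : List Int) (d : Int) (counts : PySem.Dict Int Int)
    (hc : ∀ k : Nat, counts.getD (k : Int) 0 = ((ec.filter (fun x => decide (x = (k : Int)))).length : Int)) :
    ∀ (l : List Char) (k : Nat) (pos : List (Int × Int)) (seen : Int),
      seen = ((ec.filter (fun x => decide (x < (k : Int)))).length : Int) →
      ((PySem.List.enumerate l (k : Int)).foldl
        (fun (p : List (Int × Int) × Int) ic =>
          let pos := if ic.2 = '#' then p.1 ++ [(row, ic.1 + p.2 * (d - 1))] else p.1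
          (pos, p.2 + counts.getD ic.1 0))
        (pos, seen)).1 = pos ++ gspec row ec d l k := by
  intro l
  induction l with
  | nil =>
    intro k pos seen hseen
    simp [PySem.List.enumerate_nil, gspec]
  | cons c rest ih =>
    intro k pos seen hseen
    rw [PySem.List.enumerate_cons, List.foldl_cons]
    have hk1 : (k : Int) + 1 = ((k + 1 : Nat) : Int) := by push_cast; ring
    have hseen' : seen + counts.getD (k : Int) 0
        = ((ec.filter (fun x => decide (x < ((k + 1 : Nat) : Int)))).length : Int) := by
      rw [hseen, hc k, ← hk1, cnt_succ]
    simp only []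
    by_cases hch : c = '#'
    · simp only [hch, if_pos rfl, hk1]
      rw [ih (k + 1) _ _ hseen']
      simp only [gspec, if_pos rfl, List.append_assoc, List.singleton_append,
        List.nil_append, hseen]
      have : ((ec.filter (fun x => decide (x < (k : Int)))).length : Int) * (d - 1)
          = ((ec.filter (fun x => decide (x < (k : Int)))).length : Int) * d
            - ((ec.filter (fun x => decide (x < (k : Int)))).length : Int) := by ring
      rw [this]
      simp
    · simp only [if_neg hch, hk1]
      rw [ih (k + 1) _ _ hseen']
      simp only [gspec, if_neg hch, List.nil_append]

-- ===== VERDICT (by name: the statement is the Claim_ definition above) =====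
theorem find_all_galaxies_spec : Claim_equal_find_all_galaxies := by
  intro s row ec d _
  unfold Spec_find_all_galaxies
  unfold find_all_galaxies find_all_galaxies_alt
  have hfind : PySem.Str.find s "#" = PySem.Chars.findFrom s.toList ['#'] ((0 : Nat) : Int) none := by
    rw [PySem.Str.find_eq, show ("#".toList) = ['#'] from rfl, Nat.cast_zero,
      PySem.Chars.findFrom_zero]
  rw [hfind, aloop_eq s row ec d (s.toList.length + 1) 0 (Nat.zero_le _) (by omega),
    List.drop_zero]
  have hc0 : ∀ k : Nat,
      (ec.foldl (fun p c => if c < 0 then (p.1, p.2 + 1)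
          else (p.1.insert c (p.1.getD c 0 + 1), p.2))
        ((PySem.Dict.empty : PySem.Dict Int Int), (0 : Int))).1.getD (k : Int) 0
      = ((ec.filter (fun x => decide (x = (k : Int)))).length : Int) := by
    intro k
    have h := initFold_getD ec k PySem.Dict.empty 0
    exact h.trans (by simp)
  have hseen0 : (ec.foldl (fun p c => if c < 0 then (p.1, p.2 + 1)
          else (p.1.insert c (p.1.getD c 0 + 1), p.2))
        ((PySem.Dict.empty : PySem.Dict Int Int), (0 : Int))).2
      = ((ec.filter (fun x => decide (x < ((0 : Nat) : Int)))).length : Int) := by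
    have h := initFold_snd ec PySem.Dict.empty 0
    exact h.trans (by simp)
  have := bfold_eq row ec d _ hc0 s.toList 0 [] _ hseen0
  rw [Nat.cast_zero] at this
  simp only [this, List.nil_append]
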